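-- pv_equiv track=rewrite | github.com/Dowonida/BkJn | 프로그래머스/1/72410. 신규 아이디 추천/신규 아이디 추천.py | solution
-- ===== SOURCE A (Python) =====
-- def solution(new_id):
--     stk = ['.']
--     A = set('qwertyuiopasdfghjklzxcvbnm')
--     B = set('1234567890_-')
--     for i in new_id.lower():
--         if i in A:
--             stk.append(i)
--         elif i in B:
--             stk.append(i)
--         elif i == '.' and stk[-1]!=i:
--             stk.append(i)
--     stk = stk[1:16]
--     if not stk:
--         stk.append('a')
--     if stk[-1] == '.':
--         stk.pop()
--     while len(stk)<3:
--         stk.append(stk[-1])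
--     answer = ''.join(stk)
--
--     return answer
-- ===== SOURCE B (Python) =====
-- import re
--
-- def solution(new_id):
--     s = new_id.lower()
--     s = re.sub(r'[^a-z0-9_.\-]', '', s)   # keep only lowercase letters, digits, _, ., -
--     s = re.sub(r'\.+', '.', s)            # collapse runs of dots
--     s = re.sub(r'^\.', '', s)             # drop a leading dot (after collapsing there is at most one)
--     s = s[:15]
--     if not s:
--         s = 'a'
--     s = re.sub(r'\.$', '', s)             # drop a trailing dot (at most one survives collapsing)
--     if len(s) < 3:
--         s = s + s[-1] * (3 - len(s))
--     return s
-- ===== Notes on version B (the rewrite author's own statement) =====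
-- stated objective: idiomatic
-- what changed: A's single stateful loop over a sentinel-initialized stack is replaced by the canonical regex pipeline: filter the allowed character class, collapse dot runs, strip the leading dot, truncate to 15, strip a trailing dot, pad to length 3.
import Mathlib
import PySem

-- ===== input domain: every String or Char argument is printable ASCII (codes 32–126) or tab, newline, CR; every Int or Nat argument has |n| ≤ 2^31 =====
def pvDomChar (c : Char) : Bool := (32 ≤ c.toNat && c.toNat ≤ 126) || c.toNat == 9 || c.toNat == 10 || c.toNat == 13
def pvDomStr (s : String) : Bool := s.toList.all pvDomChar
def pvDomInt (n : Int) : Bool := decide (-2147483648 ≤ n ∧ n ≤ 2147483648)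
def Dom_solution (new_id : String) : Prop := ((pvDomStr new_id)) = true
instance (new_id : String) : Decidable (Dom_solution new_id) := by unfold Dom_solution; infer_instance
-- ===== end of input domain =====

-- B replaces A's single sentinel-stack loop by an idiomatic pipeline of independent substitution
-- passes (filter the character class, collapse dot runs, strip a leading dot, truncate, strip a
-- trailing dot, pad); same cost, clearer structure.

-- ===== PORT A =====
-- the body of A's for-loop (stk[-1] is PySem.List.pyGet? stk (-1))
def pvStepA (stk : List Char) (i : Char) : List Char :=
  if PySem.Set.contains (PySem.Set.ofList "qwertyuiopasdfghjklzxcvbnm".toList) i then stk ++ [i]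
  else if PySem.Set.contains (PySem.Set.ofList "1234567890_-".toList) i then stk ++ [i]
  else if i = '.' ∧ PySem.List.pyGet? stk (-1) ≠ some i then stk ++ [i]
  else stk
-- A's 'while len(stk)<3: stk.append(stk[-1])'; at every call site stk is provably nonempty, so the
-- default of getLastD is never used (Python's stk[-1] would raise IndexError on an empty list)
def pvPadA (stk : List Char) : List Char :=
  if stk.length < 3 then pvPadA (stk ++ [stk.getLastD 'a']) else stk
termination_by 3 - stk.length
decreasing_by simp [List.length_append]; omega

def solution (new_id : String) : String :=
  let stk := (PySem.Str.lower new_id).toList.foldl pvStepA ['.']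
  let stk := PySem.List.slice stk (some 1) (some 16)
  let stk := if stk = [] then stk ++ ['a'] else stk
  let stk := if PySem.List.pyGet? stk (-1) = some '.' then stk.dropLast else stk
  let stk := pvPadA stk
  String.ofList stk

-- ===== PORT B =====
-- the character class of re.sub(r'[^a-z0-9_.\-]', '', s), expanded (exact: the class is this set of code points)
def pvKeep : List Char := "abcdefghijklmnopqrstuvwxyz0123456789_.-".toList
-- re.sub(r'\.+', '.', s): each maximal run of dots becomes a single dot (exact for this pattern)
def pvCollapse : List Char → List Char
  | [] => []
  | c :: cs => if c = '.' then '.' :: pvCollapse (cs.dropWhile (· = '.')) else c :: pvCollapse cs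
termination_by l => l.length
decreasing_by
  · have := List.length_dropWhile_le (fun c => c = '.') cs; simp at this ⊢; omega
  · simp

def solution_alt (new_id : String) : String :=
  let s := (PySem.Str.lower new_id).toList
  let s := s.filter (fun c => c ∈ pvKeep)
  let s := pvCollapse s
  let s := if s.head? = some '.' then s.tail else s
  let s := s.take 15
  let s := if s = [] then ['a'] else s
  let s := if s.getLast? = some '.' then s.dropLast else s
  let s := if s.length < 3 then s ++ List.replicate (3 - s.length) (s.getLastD 'a') else s
  String.ofList s

-- ===== PRECONDITION & SPEC =====
def Spec_solution (new_id : String) (out : String) : Prop := out = solution_alt new_id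
instance (new_id : String) (out : String) : Decidable (Spec_solution new_id out) := by unfold Spec_solution; infer_instance

-- ===== CLAIM (what is proved, stated in full; the proofs are below) =====
def Claim_equal_solution : Prop := ∀ (new_id : String), Dom_solution new_id → Spec_solution new_id (solution new_id)

-- ===== LEMMAS AND PROOFS =====

-- A's loop, abstracted to the only state it reads besides the output:
-- whether the last kept character is a dot
def pvProc : List Char → Bool → List Char
  | [], _ => []
  | c :: cs, p =>
    if PySem.Set.contains (PySem.Set.ofList "qwertyuiopasdfghjklzxcvbnm".toList) c then c :: pvProc cs false
    else if PySem.Set.contains (PySem.Set.ofList "1234567890_-".toList) c then c :: pvProc cs false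
    else if c = '.' ∧ p = false then '.' :: pvProc cs true
    else pvProc cs p
lemma pvContA_ne_dot {c : Char}
    (h : PySem.Set.contains (PySem.Set.ofList "qwertyuiopasdfghjklzxcvbnm".toList) c = true) : c ≠ '.' := by
  rintro rfl; revert h; decide
lemma pvContB_ne_dot {c : Char}
    (h : PySem.Set.contains (PySem.Set.ofList "1234567890_-".toList) c = true) : c ≠ '.' := by
  rintro rfl; revert h; decide
-- step lemmas for pvProc, one per branch of A's loop body
lemma pvProc_A {c : Char} (cs : List Char) (p : Bool)
    (h : PySem.Set.contains (PySem.Set.ofList "qwertyuiopasdfghjklzxcvbnm".toList) c = true) :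
    pvProc (c :: cs) p = c :: pvProc cs false := by rw [pvProc, if_pos h]
lemma pvProc_B {c : Char} (cs : List Char) (p : Bool)
    (hA : ¬ PySem.Set.contains (PySem.Set.ofList "qwertyuiopasdfghjklzxcvbnm".toList) c = true)
    (h : PySem.Set.contains (PySem.Set.ofList "1234567890_-".toList) c = true) :
    pvProc (c :: cs) p = c :: pvProc cs false := by rw [pvProc, if_neg hA, if_pos h]
lemma pvProc_dot (cs : List Char) :
    pvProc ('.' :: cs) false = '.' :: pvProc cs true := by
  rw [pvProc, if_neg (by decide), if_neg (by decide), if_pos ⟨rfl, rfl⟩]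
lemma pvProc_dot_skip (cs : List Char) :
    pvProc ('.' :: cs) true = pvProc cs true := by
  rw [pvProc, if_neg (by decide), if_neg (by decide), if_neg (by simp)]
lemma pvProc_skip {c : Char} (cs : List Char) (p : Bool)
    (hA : ¬ PySem.Set.contains (PySem.Set.ofList "qwertyuiopasdfghjklzxcvbnm".toList) c = true)
    (hB : ¬ PySem.Set.contains (PySem.Set.ofList "1234567890_-".toList) c = true)
    (hc : c ≠ '.') :
    pvProc (c :: cs) p = pvProc cs p := by
  rw [pvProc, if_neg hA, if_neg hB, if_neg (by simp [hc])]
-- A's fold equals the abstracted loop appended to the initial stack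
lemma pvFoldA (cs : List Char) : ∀ stk0 : List Char,
    cs.foldl pvStepA stk0 = stk0 ++ pvProc cs (stk0.getLast? == some '.') := by
  induction cs with
  | nil => intro stk0; simp [pvProc]
  | cons c cs ih =>
    intro stk0
    rw [List.foldl_cons, ih]
    by_cases hA : PySem.Set.contains (PySem.Set.ofList "qwertyuiopasdfghjklzxcvbnm".toList) c = true
    · rw [pvProc_A cs _ hA]
      have hs : pvStepA stk0 c = stk0 ++ [c] := by unfold pvStepA; rw [if_pos hA]
      rw [hs]
      have h1 : ((stk0 ++ [c]).getLast? == some '.') = false := by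
        simp; exact pvContA_ne_dot hA
      rw [h1]; simp
    · by_cases hB : PySem.Set.contains (PySem.Set.ofList "1234567890_-".toList) c = true
      · rw [pvProc_B cs _ hA hB]
        have hs : pvStepA stk0 c = stk0 ++ [c] := by unfold pvStepA; rw [if_neg hA, if_pos hB]
        rw [hs]
        have h1 : ((stk0 ++ [c]).getLast? == some '.') = false := by
          simp; exact pvContB_ne_dot hB
        rw [h1]; simp
      · by_cases hc : c = '.'
        · subst hc
          by_cases hp : stk0.getLast? = some '.'
          · have hs : pvStepA stk0 '.' = stk0 := by
              unfold pvStepA; rw [if_neg hA, if_neg hB, if_neg (by simp [PySem.List.pyGet?_neg_one, hp])]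
            rw [hs, show (stk0.getLast? == some '.') = true from by simp [hp], pvProc_dot_skip]
          · have hs : pvStepA stk0 '.' = stk0 ++ ['.'] := by
              unfold pvStepA; rw [if_neg hA, if_neg hB, if_pos ⟨rfl, by simp [PySem.List.pyGet?_neg_one, hp]⟩]
            rw [hs, show (stk0.getLast? == some '.') = false from by simp [hp], pvProc_dot]
            have h1 : ((stk0 ++ ['.']).getLast? == some '.') = true := by simp [List.getLast?_concat]
            rw [h1]; simp
        · have hs : pvStepA stk0 c = stk0 := by
            unfold pvStepA; rw [if_neg hA, if_neg hB, if_neg (by simp [hc])]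
          rw [hs, pvProc_skip cs _ hA hB hc]
lemma pvKeep_iff (c : Char) :
    (c ∈ pvKeep) ↔ (PySem.Set.contains (PySem.Set.ofList "qwertyuiopasdfghjklzxcvbnm".toList) c = true
      ∨ PySem.Set.contains (PySem.Set.ofList "1234567890_-".toList) c = true ∨ c = '.') := by
  have hp : pvKeep.Perm ("qwertyuiopasdfghjklzxcvbnm".toList ++ "1234567890_-".toList ++ ['.']) := by
    decide
  rw [show (c ∈ pvKeep) ↔ c ∈ ("qwertyuiopasdfghjklzxcvbnm".toList ++ "1234567890_-".toList ++ ['.']) from hp.mem_iff]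
  simp [PySem.Set.contains_iff, PySem.Set.mem_ofList, List.mem_append, or_assoc]
-- skipping the rejected characters first does not change the loop's output
lemma pvProc_filter (cs : List Char) : ∀ p,
    pvProc cs p = pvProc (cs.filter (fun c => c ∈ pvKeep)) p := by
  induction cs with
  | nil => intro p; simp
  | cons c cs ih =>
    intro p
    by_cases hk : c ∈ pvKeep
    · rcases (pvKeep_iff c).1 hk with hA | hB | hc
      · rw [pvProc_A cs p hA, List.filter_cons_of_pos (by simpa using hk), pvProc_A _ p hA, ih]
      · by_cases hA : PySem.Set.contains (PySem.Set.ofList "qwertyuiopasdfghjklzxcvbnm".toList) c = true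
        · rw [pvProc_A cs p hA, List.filter_cons_of_pos (by simpa using hk), pvProc_A _ p hA, ih]
        · rw [pvProc_B cs p hA hB, List.filter_cons_of_pos (by simpa using hk), pvProc_B _ p hA hB, ih]
      · subst hc
        rw [List.filter_cons_of_pos (by simpa using hk)]
        cases p with
        | false => rw [pvProc_dot, pvProc_dot, ih]
        | true => rw [pvProc_dot_skip, pvProc_dot_skip, ih]
    · have hA : ¬ PySem.Set.contains (PySem.Set.ofList "qwertyuiopasdfghjklzxcvbnm".toList) c = true := by
        intro h; exact hk ((pvKeep_iff c).2 (Or.inl h))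
      have hB : ¬ PySem.Set.contains (PySem.Set.ofList "1234567890_-".toList) c = true := by
        intro h; exact hk ((pvKeep_iff c).2 (Or.inr (Or.inl h)))
      have hc : c ≠ '.' := fun h => hk ((pvKeep_iff c).2 (Or.inr (Or.inr h)))
      rw [pvProc_skip cs p hA hB hc, List.filter_cons_of_neg (by simpa using hk), ih]
-- stripping the leading dot of the collapsed list = collapsing after dropping the leading dot run
lemma pvDropLead_collapse (cs : List Char) :
    (if (pvCollapse cs).head? = some '.' then (pvCollapse cs).tail else pvCollapse cs)
      = pvCollapse (cs.dropWhile (· = '.')) := by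
  cases cs with
  | nil => simp [pvCollapse]
  | cons c cs =>
    by_cases hc : c = '.'
    · subst hc; rw [pvCollapse]; simp [List.dropWhile_cons]
    · rw [pvCollapse]; simp only [hc, if_false, List.dropWhile_cons, decide_eq_true_eq, ite_false]
      rw [pvCollapse]; simp [hc]
-- on all-kept input the loop is collapse (p = false), resp. collapse then leading-dot strip (p = true)
lemma pvProc_collapse (cs : List Char) (h : ∀ c ∈ cs, c ∈ pvKeep) :
    pvProc cs false = pvCollapse cs ∧
    pvProc cs true = (if (pvCollapse cs).head? = some '.' then (pvCollapse cs).tail else pvCollapse cs) := by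
  induction cs with
  | nil => simp [pvProc, pvCollapse]
  | cons c cs ih =>
    have hc := h c (by simp)
    have ih' := ih (fun x hx => h x (by simp [hx]))
    by_cases hdot : c = '.'
    · subst hdot
      have hcol : pvCollapse ('.' :: cs) = '.' :: pvCollapse (cs.dropWhile (· = '.')) := by
        rw [pvCollapse]; simp
      constructor
      · rw [pvProc_dot, hcol, ih'.2, pvDropLead_collapse]
      · rw [pvProc_dot_skip, hcol, ih'.2, pvDropLead_collapse]; simp
    · have hcol : pvCollapse (c :: cs) = c :: pvCollapse cs := by
        rw [pvCollapse]; simp [hdot]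
      rcases (pvKeep_iff c).1 hc with hA | hB | h'
      · constructor
        · rw [pvProc_A cs _ hA, hcol, ih'.1]
        · rw [pvProc_A cs _ hA, hcol, ih'.1]; simp [hdot]
      · by_cases hA : PySem.Set.contains (PySem.Set.ofList "qwertyuiopasdfghjklzxcvbnm".toList) c = true
        · constructor
          · rw [pvProc_A cs _ hA, hcol, ih'.1]
          · rw [pvProc_A cs _ hA, hcol, ih'.1]; simp [hdot]
        · constructor
          · rw [pvProc_B cs _ hA hB, hcol, ih'.1]
          · rw [pvProc_B cs _ hA hB, hcol, ih'.1]; simp [hdot]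
      · exact absurd h' hdot
-- the while-loop pads with copies of the last element up to length 3
lemma pvPadA_eq (l : List Char) :
    pvPadA l = if l.length < 3 then l ++ List.replicate (3 - l.length) (l.getLastD 'a') else l := by
  match l with
  | [] => rw [pvPadA]; simp; rw [pvPadA]; simp; rw [pvPadA]; simp; rw [pvPadA]; simp
  | [a] => rw [pvPadA]; simp; rw [pvPadA]; simp; rw [pvPadA]; simp
  | [a, b] => rw [pvPadA]; simp; rw [pvPadA]; simp
  | a :: b :: c :: t => rw [pvPadA]; simp
lemma pv_main (new_id : String) : solution new_id = solution_alt new_id := by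
  simp only [solution, solution_alt]
  set cs := (PySem.Str.lower new_id).toList with hcs
  have hkeep : ∀ c ∈ cs.filter (fun c => c ∈ pvKeep), c ∈ pvKeep := by
    intro c hcmem; exact of_decide_eq_true (List.mem_filter.1 hcmem).2
  have hfold : cs.foldl pvStepA ['.'] = '.' :: pvProc cs true := by
    rw [pvFoldA]; simp
  have hproc : pvProc cs true
      = (if (pvCollapse (cs.filter (fun c => c ∈ pvKeep))).head? = some '.'
          then (pvCollapse (cs.filter (fun c => c ∈ pvKeep))).tail
          else pvCollapse (cs.filter (fun c => c ∈ pvKeep))) := by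
    rw [pvProc_filter, (pvProc_collapse _ hkeep).2]
  have hslice : PySem.List.slice ('.' :: pvProc cs true) (some 1) (some 16)
      = (pvProc cs true).take 15 := by
    rw [PySem.List.slice_toNat _ (by norm_num) (by norm_num)]
    simp
  rw [hfold, hslice, hproc]
  set t := (if (pvCollapse (cs.filter (fun c => c ∈ pvKeep))).head? = some '.'
      then (pvCollapse (cs.filter (fun c => c ∈ pvKeep))).tail
      else pvCollapse (cs.filter (fun c => c ∈ pvKeep))).take 15 with ht
  by_cases hemp : t = []
  · simp [hemp, PySem.List.pyGet?_neg_one, pvPadA_eq]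
  · simp only [hemp, if_neg, if_false, PySem.List.pyGet?_neg_one, pvPadA_eq, ite_false]

-- ===== VERDICT (by name: the statement is the Claim_ definition above) =====
theorem solution_spec : Claim_equal_solution := by
  intro new_id _
  unfold Spec_solution
  exact pv_main new_id
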